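-- pv_equiv track=rewrite | github.com/agudoshnik/personal_projects | morePractice.py | moveNeg
-- ===== SOURCE A (Python) =====
-- def moveNeg(a):
--     arr = []
--     for i in range(len(a)):
--         if a[i] > 0:
--             arr.append(a[i])
--     for j in range(len(a)):
--         if a[j] < 0:
--             arr.append(a[j])
--     return(arr)
-- ===== SOURCE B (Python) =====
-- def moveNeg(a):
--     # drop zeros, then one stable sort keyed on sign: positives (key False) first,
--     # negatives (key True) after, each group keeping its original order
--     return sorted((x for x in a if x != 0), key=lambda x: x < 0)
-- ===== Notes on version B (the rewrite author's own statement) =====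
-- stated objective: idiomatic
-- what changed: Replaces A's two index-based collecting passes with one stable sort of the nonzero elements keyed on sign (x < 0), whose stability reproduces the positives-then-negatives order.
import Mathlib
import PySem

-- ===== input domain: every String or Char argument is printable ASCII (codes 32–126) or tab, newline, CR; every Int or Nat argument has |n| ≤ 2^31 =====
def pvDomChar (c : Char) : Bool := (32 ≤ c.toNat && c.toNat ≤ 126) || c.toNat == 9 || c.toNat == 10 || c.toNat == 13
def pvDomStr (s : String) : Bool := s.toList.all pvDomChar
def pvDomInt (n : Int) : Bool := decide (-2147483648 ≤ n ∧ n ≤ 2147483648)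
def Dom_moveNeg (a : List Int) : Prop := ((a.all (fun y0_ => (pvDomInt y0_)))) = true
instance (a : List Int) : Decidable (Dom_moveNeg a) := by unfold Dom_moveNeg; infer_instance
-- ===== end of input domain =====

-- B replaces A's two index-based collecting passes by one stable sort of the nonzero
-- elements keyed on sign (more idiomatic; not faster).

-- ===== PORT A =====
def moveNeg (a : List Int) : List Int :=
  -- arr = []; for i in range(len(a)): if a[i] > 0: arr.append(a[i])
  let arr := (PySem.List.pyRange 0 (PySem.List.len a)).foldl
    (fun arr i => if PySem.List.pyGetD a i 0 > 0 then arr ++ [PySem.List.pyGetD a i 0] else arr) []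
  -- for j in range(len(a)): if a[j] < 0: arr.append(a[j])
  (PySem.List.pyRange 0 (PySem.List.len a)).foldl
    (fun arr j => if PySem.List.pyGetD a j 0 < 0 then arr ++ [PySem.List.pyGetD a j 0] else arr) arr

-- ===== PORT B =====
-- sorted((x for x in a if x != 0), key=lambda x: x < 0); the bool key is Bool with false < true
def moveNeg_alt (a : List Int) : List Int :=
  PySem.List.sorted (a.filter (fun x => x ≠ 0)) (fun x => decide (x < 0))

-- ===== PRECONDITION & SPEC =====
def Spec_moveNeg (a : List Int) (out : List Int) : Prop := out = moveNeg_alt a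
instance (a : List Int) (out : List Int) : Decidable (Spec_moveNeg a out) := by unfold Spec_moveNeg; infer_instance

-- ===== CLAIM (what is proved, stated in full; the proofs are below) =====
def Claim_equal_moveNeg : Prop := ∀ (a : List Int), Dom_moveNeg a → Spec_moveNeg a (moveNeg a)

-- ===== LEMMAS AND PROOFS =====

-- A's result: positives (in order) then negatives (in order)
theorem moveNeg_eq_filters (a : List Int) :
    moveNeg a = a.filter (fun x => 0 < x) ++ a.filter (fun x => x < 0) := by
  show ((PySem.List.pyRange 0 (PySem.List.len a)).foldl
      (fun arr j => if PySem.List.pyGetD a j 0 < 0 then arr ++ [PySem.List.pyGetD a j 0] else arr)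
      ((PySem.List.pyRange 0 (PySem.List.len a)).foldl
        (fun arr i => if PySem.List.pyGetD a i 0 > 0 then arr ++ [PySem.List.pyGetD a i 0] else arr) [])) = _
  rw [PySem.List.foldl_pyRange_pyGetD a 0 (fun acc v => if v > 0 then acc ++ [v] else acc) [] le_rfl,
      PySem.List.foldl_pyRange_pyGetD a 0 (fun acc v => if v < 0 then acc ++ [v] else acc) _ le_rfl]
  simp only [Int.toNat_zero, List.drop_zero]
  rw [show (fun (acc : List Int) (v : Int) => if v > 0 then acc ++ [v] else acc)
        = fun acc v => if (decide (0 < v)) = true then acc ++ [id v] else acc by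
      funext acc v; simp [gt_iff_lt],
      PySem.List.foldl_append_if (fun v => decide ((0:Int) < v)) id a []]
  rw [show (fun (acc : List Int) (v : Int) => if v < 0 then acc ++ [v] else acc)
        = fun acc v => if (decide (v < 0)) = true then acc ++ [id v] else acc by
      funext acc v; simp,
      PySem.List.foldl_append_if (fun v => decide (v < (0:Int))) id _ _]
  simp [List.map_id]

-- inserting a key-false element lands right after the key-false prefix
theorem insertBy_mid (before : Int → Int → Bool) (x : Int) (P N : List Int)
    (hP : ∀ y ∈ P, before x y = false) (hN : ∀ y ∈ N, before x y = true) :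
    PySem.List.insertBy before x (P ++ N) = P ++ x :: N := by
  induction P with
  | nil =>
    cases N with
    | nil => rfl
    | cons y ys => simp [PySem.List.insertBy, hN y (by simp)]
  | cons p P ih =>
    have hp := hP p (by simp)
    simp [PySem.List.insertBy, hp, ih (fun y hy => hP y (by simp [hy]))]

-- the stable insertion-sort loop partitions nonzero elements on the sign key
theorem sort_loop (xs P N : List Int) (hP : ∀ y ∈ P, 0 < y) (hN : ∀ y ∈ N, y < 0)
    (hxs : ∀ x ∈ xs, x ≠ 0) :
    xs.foldl (fun acc x =>
        PySem.List.insertBy (fun a b => decide ((decide (a < 0) : Bool) < (decide (b < 0) : Bool))) x acc)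
      (P ++ N)
    = (P ++ xs.filter (fun x => 0 < x)) ++ (N ++ xs.filter (fun x => x < 0)) := by
  induction xs generalizing P N with
  | nil => simp
  | cons x xs ih =>
    have hx := hxs x (by simp)
    have hxs' : ∀ y ∈ xs, y ≠ 0 := fun y hy => hxs y (by simp [hy])
    by_cases hpos : 0 < x
    · have hneg : ¬ x < 0 := by omega
      have hins : PySem.List.insertBy
          (fun a b => decide ((decide (a < 0) : Bool) < (decide (b < 0) : Bool))) x (P ++ N)
          = (P ++ [x]) ++ N := by
        rw [insertBy_mid _ x P N
          (fun y hy => by simp [hneg, show ¬ y < 0 by have := hP y hy; omega])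
          (fun y hy => by simp [hneg, hN y hy])]
        simp
      have hP' : ∀ y ∈ P ++ [x], 0 < y := by
        intro y hy
        rcases List.mem_append.1 hy with h | h
        · exact hP y h
        · simp at h; omega
      rw [List.foldl_cons, hins, ih (P ++ [x]) N hP' hN hxs']
      simp [hpos, hneg]
    · have hneg : x < 0 := by omega
      have hins : PySem.List.insertBy
          (fun a b => decide ((decide (a < 0) : Bool) < (decide (b < 0) : Bool))) x (P ++ N)
          = P ++ (N ++ [x]) := by
        rw [PySem.List.insertBy_of_forall_not_before _ x (P ++ N)
          (fun y hy => by simp [hneg])]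
        simp
      have hN' : ∀ y ∈ N ++ [x], y < 0 := by
        intro y hy
        rcases List.mem_append.1 hy with h | h
        · exact hN y h
        · simp at h; omega
      rw [List.foldl_cons, hins, ih P (N ++ [x]) hP hN' hxs']
      simp [hpos, hneg]

theorem moveNeg_alt_eq_filters (a : List Int) :
    moveNeg_alt a = a.filter (fun x => 0 < x) ++ a.filter (fun x => x < 0) := by
  show PySem.List.sorted (a.filter (fun x => x ≠ 0)) (fun x => decide (x < 0)) = _
  rw [PySem.List.sorted_eq_foldl_insertBy]
  have := sort_loop (a.filter (fun x => x ≠ 0)) [] []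
    (by simp) (by simp)
    (by intro x hx; simpa using (List.mem_filter.1 hx).2)
  simp only [List.nil_append] at this
  rw [this, List.filter_filter, List.filter_filter]
  congr 1 <;> (apply List.filter_congr; intro x _; simp; omega)

-- ===== VERDICT (by name: the statement is the Claim_ definition above) =====
theorem moveNeg_spec : Claim_equal_moveNeg := by
  intro a _
  show moveNeg a = moveNeg_alt a
  rw [moveNeg_eq_filters, moveNeg_alt_eq_filters]
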